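-- pv_equiv track=rewrite | github.com/lunar0220/PythonBasicRepo | homeworks/homework_13.py | matrix_operations
-- ===== SOURCE A (Python) =====
-- from typing import List, Tuple
--
-- def matrix_operations(matrix: List[List[int]]) -> Tuple[List[int], List[int], List[List[int]], List[List[int]]]:
--     row_sum = []
--     for row in matrix:
--         row_sum.append(sum(row))
--
--
--     col_sum = []
--     for i in range(len(matrix[0])):
--         s = 0
--         for row in matrix:
--             s += row[i]
--         col_sum.append(s)
--
--
--     transposed_matrix = []
--     for i in range(len(matrix[0])):
--         new_row = []
--         for row in matrix:
--             new_row.append(row[i])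
--         transposed_matrix.append(new_row)
--
--
--     multiplied_matrix = []
--     for row in matrix:
--         multiplied_matrix.append(list(map(lambda x: x * 2, row)))
--
--     return row_sum, col_sum, transposed_matrix, multiplied_matrix
-- ===== SOURCE B (Python) =====
-- from typing import List, Tuple
--
-- def matrix_operations(matrix: List[List[int]]) -> Tuple[List[int], List[int], List[List[int]], List[List[int]]]:
--     transposed_matrix = [[row[i] for row in matrix] for i in range(len(matrix[0]))]
--     col_sum = [sum(col) for col in transposed_matrix]
--     row_sum = [sum(r) for r in matrix]
--     multiplied_matrix = [[x * 2 for x in r] for r in matrix]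
--     return row_sum, col_sum, transposed_matrix, multiplied_matrix
-- ===== Notes on version B (the rewrite author's own statement) =====
-- stated objective: simpler
-- what changed: B builds the transpose first and derives the column sums from it as [sum(col) for col in transposed_matrix], replacing A's separate nested column-scan loop; all four results are single comprehensions instead of four accumulator loops.
import Mathlib
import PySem

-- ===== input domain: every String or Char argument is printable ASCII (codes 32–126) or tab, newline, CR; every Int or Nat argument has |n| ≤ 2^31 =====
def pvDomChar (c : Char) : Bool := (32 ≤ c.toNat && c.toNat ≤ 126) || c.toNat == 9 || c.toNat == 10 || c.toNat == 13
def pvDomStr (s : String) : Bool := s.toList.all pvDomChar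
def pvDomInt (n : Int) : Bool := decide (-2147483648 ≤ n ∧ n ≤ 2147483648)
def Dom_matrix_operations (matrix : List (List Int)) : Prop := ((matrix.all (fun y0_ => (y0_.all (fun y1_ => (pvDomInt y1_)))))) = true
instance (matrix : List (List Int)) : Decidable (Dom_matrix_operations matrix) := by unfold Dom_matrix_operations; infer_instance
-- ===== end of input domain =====

-- B builds the transpose first and derives the column sums from it, replacing A's separate
-- nested column-scan loop; all four results become single comprehensions (objective: simpler).


-- ===== PORT A =====
def matrix_operations (matrix : List (List Int)) : List Int × List Int × List (List Int) × List (List Int) :=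
  -- row_sum loop
  let row_sum := matrix.foldl (fun acc row => acc ++ [row.sum]) []
  -- len(matrix[0]); Python raises IndexError on [] — excluded by Pre_, getD [] is a dummy there
  let w := ((PySem.List.pyGet? matrix 0).getD []).length
  -- col_sum: outer loop over range(len(matrix[0])), inner accumulator over rows;
  -- row[i] ported as pyGetD with dummy 0 (in range under Pre_; Python raises outside Pre_)
  let col_sum := (PySem.List.pyRange 0 w).foldl (fun acc i =>
    acc ++ [matrix.foldl (fun s row => s + PySem.List.pyGetD row i 0) 0]) []
  -- transposed_matrix: same doubly nested loop shape, appending elements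
  let transposed_matrix := (PySem.List.pyRange 0 w).foldl (fun acc i =>
    acc ++ [matrix.foldl (fun new_row row => new_row ++ [PySem.List.pyGetD row i 0]) []]) []
  -- multiplied_matrix loop with list(map(lambda x: x*2, row))
  let multiplied_matrix := matrix.foldl (fun acc row => acc ++ [row.map (fun x => x * 2)]) []
  (row_sum, col_sum, transposed_matrix, multiplied_matrix)

-- ===== PORT B =====
def matrix_operations_alt (matrix : List (List Int)) : List Int × List Int × List (List Int) × List (List Int) :=
  let w := ((PySem.List.pyGet? matrix 0).getD []).length
  let transposed_matrix := (PySem.List.pyRange 0 w).map (fun i =>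
    matrix.map (fun row => PySem.List.pyGetD row i 0))
  let col_sum := transposed_matrix.map (fun col => col.sum)
  let row_sum := matrix.map (fun r => r.sum)
  let multiplied_matrix := matrix.map (fun r => r.map (fun x => x * 2))
  (row_sum, col_sum, transposed_matrix, multiplied_matrix)

-- ===== PRECONDITION & SPEC =====
-- Pre_ excludes exactly the inputs where Python A raises IndexError: the empty matrix
-- (matrix[0]) and ragged matrices whose later rows are shorter than the first row (row[i]).
def Pre_matrix_operations (matrix : List (List Int)) : Prop :=
  matrix ≠ [] ∧ ∀ row ∈ matrix, (matrix.headD []).length ≤ row.length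
instance (matrix : List (List Int)) : Decidable (Pre_matrix_operations matrix) := by
  unfold Pre_matrix_operations; infer_instance
def pvWitness_matrix_operations : List (List Int) := [[1, 2], [3, 4]]

def Spec_matrix_operations (matrix : List (List Int)) (out : List Int × List Int × List (List Int) × List (List Int)) : Prop := out = matrix_operations_alt matrix
instance (matrix : List (List Int)) (out : List Int × List Int × List (List Int) × List (List Int)) : Decidable (Spec_matrix_operations matrix out) := by unfold Spec_matrix_operations; infer_instance

-- ===== CLAIM (what is proved, stated in full; the proofs are below) =====
def Claim_equal_matrix_operations : Prop := ∀ (matrix : List (List Int)), Dom_matrix_operations matrix → Pre_matrix_operations matrix → Spec_matrix_operations matrix (matrix_operations matrix)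

-- ===== LEMMAS AND PROOFS =====

-- ===== VERDICT (by name: the statement is the Claim_ definition above) =====
theorem matrix_operations_spec : Claim_equal_matrix_operations := by
  intro matrix _ _
  show matrix_operations matrix = matrix_operations_alt matrix
  simp only [matrix_operations, matrix_operations_alt,
    PySem.List.foldl_append_singleton_eq_map, List.nil_append,
    PySem.List.foldl_add, zero_add, List.map_map]
  rfl
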